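-- pv_equiv track=rewrite | github.com/MangriMen/SibSUTIS6semester | AVMO/course_work/main.py | getBasisIndexFromRow
-- ===== SOURCE A (Python) =====
-- def getBasisIndexFromRow(matrix: list, excluded: list, row: int) -> int:
--     """
--     Returns
--     -------
--     int
--         index of the column containing the basis element
--     """
--     index = [j for j, el in enumerate(
--         matrix[row]) if el == 1 and j not in excluded]
--     basis_index = -1
--
--     for ind in index:
--         isBasis = True
--         for i, _ in enumerate(matrix):
--             if i != row:
--                 if matrix[i][ind] != 0:
--                     isBasis = False
--         if isBasis:
--             basis_index = ind
--             break
--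
--     return basis_index
-- ===== SOURCE B (Python) =====
-- def getBasisIndexFromRow(matrix: list, excluded: list, row: int) -> int:
--     """Column-counter re-implementation: one pass over the other rows builds a
--     per-column nonzero counter; the first admissible 1-entry of the row whose
--     counter is zero is the basis column."""
--     the_row = matrix[row]
--     width = len(the_row)
--     counts = [0] * width
--     for i, r in enumerate(matrix):
--         if i != row:
--             counts = [counts[j] + (1 if r[j] != 0 else 0) for j in range(width)]
--     for j, el in enumerate(the_row):
--         if el == 1 and j not in excluded and counts[j] == 0:
--             return j
--     return -1
-- ===== Notes on version B (the rewrite author's own statement) =====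
-- stated objective: alternative
-- what changed: Replaces A's per-candidate inner scan over all rows by a single pass that builds a per-column nonzero counter over the other rows, then returns the first admissible 1-entry of the row whose counter is zero.
-- outside the precondition, e.g. on getBasisIndexFromRow([[1, 0], [2]], [], 0): A returns -1, B raises IndexError
import Mathlib
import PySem

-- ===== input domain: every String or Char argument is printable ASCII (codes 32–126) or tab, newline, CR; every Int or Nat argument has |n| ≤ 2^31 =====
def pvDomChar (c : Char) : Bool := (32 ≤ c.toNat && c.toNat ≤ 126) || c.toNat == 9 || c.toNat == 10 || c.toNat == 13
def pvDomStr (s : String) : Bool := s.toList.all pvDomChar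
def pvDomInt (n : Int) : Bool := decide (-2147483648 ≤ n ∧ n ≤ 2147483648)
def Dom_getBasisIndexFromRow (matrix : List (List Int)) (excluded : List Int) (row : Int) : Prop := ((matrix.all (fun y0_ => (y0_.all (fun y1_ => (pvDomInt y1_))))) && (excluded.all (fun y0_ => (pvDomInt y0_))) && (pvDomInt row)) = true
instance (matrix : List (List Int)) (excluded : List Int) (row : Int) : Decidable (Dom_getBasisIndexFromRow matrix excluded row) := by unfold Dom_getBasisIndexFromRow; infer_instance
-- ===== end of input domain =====

-- B replaces A's per-candidate rescans of the matrix by one per-column nonzero counter built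
-- in a single pass over the other rows (alternative algorithm, same return value).


-- ===== PORT A =====
-- the 'for ind in index: … break' loop of A (break = return ind)
def pvLoopA (matrix : List (List Int)) (row : Int) : List Int → Int
  | [] => -1
  | ind :: rest =>
    let isBasis := (PySem.List.enumerate matrix).foldl
      (fun acc p =>
        if p.1 ≠ row then
          (if PySem.List.pyGetD p.2 ind 0 ≠ 0 then false else acc)
        else acc) true
    if isBasis then ind else pvLoopA matrix row rest

def getBasisIndexFromRow (matrix : List (List Int)) (excluded : List Int) (row : Int) : Int :=
  -- matrix[row]: IndexError (pyGet? = none) excluded by Pre_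
  let rowL := PySem.List.pyGetD matrix row []
  let index := (PySem.List.enumerate rowL).filterMap
    (fun p => if p.2 = 1 ∧ p.1 ∉ excluded then some p.1 else none)
  pvLoopA matrix row index

-- ===== PORT B =====
-- the final 'for j, el in enumerate(the_row): … return j' loop of B
def pvFindB (excluded : List Int) (counts : List Int) : List (Int × Int) → Int
  | [] => -1
  | (j, el) :: rest =>
    if el = 1 ∧ j ∉ excluded ∧ PySem.List.pyGetD counts j 0 = 0 then j
    else pvFindB excluded counts rest

def getBasisIndexFromRow_alt (matrix : List (List Int)) (excluded : List Int) (row : Int) : Int :=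
  let theRow := PySem.List.pyGetD matrix row []
  let width := theRow.length
  let counts := (PySem.List.enumerate matrix).foldl
    (fun counts p =>
      if p.1 ≠ row then
        (PySem.List.pyRange 0 (width : Int) 1).map
          (fun j => PySem.List.pyGetD counts j 0 + (if PySem.List.pyGetD p.2 j 0 ≠ 0 then 1 else 0))
      else counts)
    (List.replicate width 0)
  pvFindB excluded counts (PySem.List.enumerate theRow)

-- ===== PRECONDITION & SPEC =====
-- Pre_ excludes the inputs where the Python raises IndexError: 'row' out of range for matrix,
-- and ragged matrices whose rows are shorter than matrix[row] (A indexes matrix[i][ind] and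
-- B indexes r[j]; on some ragged inputs A happens to return -1 while B raises — excluded).
def Pre_getBasisIndexFromRow (matrix : List (List Int)) (excluded : List Int) (row : Int) : Prop :=
  PySem.Raise.InRange matrix.length row ∧
    ∀ r ∈ matrix, (PySem.List.pyGetD matrix row []).length ≤ r.length
instance (matrix : List (List Int)) (excluded : List Int) (row : Int) : Decidable (Pre_getBasisIndexFromRow matrix excluded row) := by unfold Pre_getBasisIndexFromRow; infer_instance

def pvWitness_getBasisIndexFromRow : List (List Int) × List Int × Int := ([[1, 0], [0, 1]], [], 0)

def Spec_getBasisIndexFromRow (matrix : List (List Int)) (excluded : List Int) (row : Int) (out : Int) : Prop := out = getBasisIndexFromRow_alt matrix excluded row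
instance (matrix : List (List Int)) (excluded : List Int) (row : Int) (out : Int) : Decidable (Spec_getBasisIndexFromRow matrix excluded row out) := by unfold Spec_getBasisIndexFromRow; infer_instance

-- ===== CLAIM (what is proved, stated in full; the proofs are below) =====
def Claim_equal_getBasisIndexFromRow : Prop := ∀ (matrix : List (List Int)) (excluded : List Int) (row : Int), Dom_getBasisIndexFromRow matrix excluded row → Pre_getBasisIndexFromRow matrix excluded row → Spec_getBasisIndexFromRow matrix excluded row (getBasisIndexFromRow matrix excluded row)

-- ===== LEMMAS AND PROOFS =====

-- index bounds of enumerate members (specific to our ports' use of PySem.List.enumerate)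
theorem pvMemEnum {xs : List Int} {s : Int} {p : Int × Int}
    (h : p ∈ PySem.List.enumerate xs s) : s ≤ p.1 ∧ p.1 < s + xs.length := by
  induction xs generalizing s with
  | nil => rw [PySem.List.enumerate_nil] at h; cases h
  | cons x xs ih =>
    rw [PySem.List.enumerate_cons] at h
    simp only [List.length_cons]
    rcases List.mem_cons.1 h with h | h
    · subst h; push_cast; omega
    · have := ih h; push_cast at this ⊢; omega

-- A's inner 'isBasis' fold: true iff every other row is zero in column ind
theorem pvFoldA (row ind : Int) (l : List (Int × List Int)) : ∀ acc : Bool,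
    (l.foldl (fun acc p =>
      if p.1 ≠ row then (if PySem.List.pyGetD p.2 ind 0 ≠ 0 then false else acc) else acc) acc) = true
    ↔ (acc = true ∧ ∀ p ∈ l, p.1 ≠ row → PySem.List.pyGetD p.2 ind 0 = 0) := by
  induction l with
  | nil => simp
  | cons a l ih =>
    intro acc
    simp only [List.foldl_cons, ih, List.mem_cons, forall_eq_or_imp]
    by_cases hr : a.1 ≠ row <;> by_cases hz : PySem.List.pyGetD a.2 ind 0 ≠ 0 <;>
      first
      | (simp [hr, hz]; tauto)
      | simp [hr, hz]

-- B's counter fold: length is preserved, entries stay nonneg, and entry k is zero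
-- iff it started zero and every counted row is zero in column k
theorem pvCounts (row : Int) (W : Nat) (l : List (Int × List Int)) :
    ∀ c : List Int, c.length = W → (∀ k : Nat, k < W → 0 ≤ c.getD k 0) →
    (l.foldl (fun counts p =>
        if p.1 ≠ row then
          (PySem.List.pyRange 0 (W : Int) 1).map
            (fun j => PySem.List.pyGetD counts j 0 + (if PySem.List.pyGetD p.2 j 0 ≠ 0 then 1 else 0))
        else counts) c).length = W ∧
    (∀ k : Nat, k < W → 0 ≤ ((l.foldl (fun counts p =>
        if p.1 ≠ row then
          (PySem.List.pyRange 0 (W : Int) 1).map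
            (fun j => PySem.List.pyGetD counts j 0 + (if PySem.List.pyGetD p.2 j 0 ≠ 0 then 1 else 0))
        else counts) c).getD k 0)) ∧
    (∀ k : Nat, k < W → (((l.foldl (fun counts p =>
        if p.1 ≠ row then
          (PySem.List.pyRange 0 (W : Int) 1).map
            (fun j => PySem.List.pyGetD counts j 0 + (if PySem.List.pyGetD p.2 j 0 ≠ 0 then 1 else 0))
        else counts) c).getD k 0 = 0) ↔
        (c.getD k 0 = 0 ∧ ∀ p ∈ l, p.1 ≠ row → PySem.List.pyGetD p.2 (k : Int) 0 = 0))) := by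
  induction l with
  | nil => intro c hlen hnn; exact ⟨hlen, hnn, by simp⟩
  | cons a l ih =>
    intro c hlen hnn
    simp only [List.foldl_cons]
    by_cases hr : a.1 ≠ row
    · rw [if_pos hr]
      have hlen' : ((PySem.List.pyRange 0 (W : Int) 1).map
          (fun j => PySem.List.pyGetD c j 0 + (if PySem.List.pyGetD a.2 j 0 ≠ 0 then 1 else 0))).length = W := by
        simp [PySem.List.length_pyRange_one]
      have hget : ∀ k : Nat, k < W → ((PySem.List.pyRange 0 (W : Int) 1).map
          (fun j => PySem.List.pyGetD c j 0 + (if PySem.List.pyGetD a.2 j 0 ≠ 0 then 1 else 0))).getD k 0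
          = c.getD k 0 + (if PySem.List.pyGetD a.2 (k : Int) 0 ≠ 0 then 1 else 0) := by
        intro k hk
        have := PySem.List.pyGetD_map_pyRange
          (fun j => PySem.List.pyGetD c j 0 + (if PySem.List.pyGetD a.2 j 0 ≠ 0 then 1 else 0)) W k 0 hk
        simpa [PySem.List.pyGetD_natCast] using this
      have hnn' : ∀ k : Nat, k < W → 0 ≤ ((PySem.List.pyRange 0 (W : Int) 1).map
          (fun j => PySem.List.pyGetD c j 0 + (if PySem.List.pyGetD a.2 j 0 ≠ 0 then 1 else 0))).getD k 0 := by
        intro k hk; rw [hget k hk]; have := hnn k hk; split_ifs <;> omega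
      obtain ⟨L, N, H⟩ := ih _ hlen' hnn'
      refine ⟨L, N, fun k hk => ?_⟩
      rw [H k hk, hget k hk]
      have h0 := hnn k hk
      simp only [List.mem_cons, forall_eq_or_imp]
      constructor
      · rintro ⟨hz, hall⟩
        split_ifs at hz with hi
        · omega
        · rw [not_not] at hi
          exact ⟨by omega, ⟨fun _ => hi, hall⟩⟩
      · rintro ⟨hz, ha, hall⟩
        have := ha hr
        refine ⟨?_, hall⟩
        split_ifs with hi
        · exact absurd this hi
        · omega
    · rw [if_neg hr]
      obtain ⟨L, N, H⟩ := ih c hlen hnn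
      refine ⟨L, N, fun k hk => ?_⟩
      rw [H k hk]
      simp only [List.mem_cons, forall_eq_or_imp]
      constructor
      · rintro ⟨hz, hall⟩; exact ⟨hz, ⟨fun h => absurd h hr, hall⟩⟩
      · rintro ⟨hz, _, hall⟩; exact ⟨hz, hall⟩

-- the two search loops agree whenever counts[k] = 0 characterises A's isBasis test
theorem pvMain (matrix : List (List Int)) (excluded : List Int) (row : Int)
    (counts : List Int) (W : Nat)
    (hiff : ∀ k : Nat, k < W → (PySem.List.pyGetD counts (k : Int) 0 = 0 ↔
        ∀ p ∈ PySem.List.enumerate matrix 0, p.1 ≠ row → PySem.List.pyGetD p.2 (k : Int) 0 = 0)) :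
    ∀ l : List (Int × Int), (∀ p ∈ l, 0 ≤ p.1 ∧ p.1 < (W : Int)) →
    pvLoopA matrix row (l.filterMap (fun p => if p.2 = 1 ∧ p.1 ∉ excluded then some p.1 else none))
      = pvFindB excluded counts l := by
  intro l
  induction l with
  | nil => intro _; rfl
  | cons a l ih =>
    intro hb
    have ha := hb a List.mem_cons_self
    have hl := fun p hp => hb p (List.mem_cons_of_mem a hp)
    obtain ⟨a1, a2⟩ := a
    have hk : a1 = ((a1.toNat : Nat) : Int) := (Int.toNat_of_nonneg ha.1).symm
    have hkW : a1.toNat < W := by omega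
    by_cases hc : a2 = 1 ∧ a1 ∉ excluded
    · rw [List.filterMap_cons_some (f := fun p : Int × Int => if p.2 = 1 ∧ p.1 ∉ excluded then some p.1 else none) (b := a1) (by simp [hc.1, hc.2])]
      by_cases hz : PySem.List.pyGetD counts a1 0 = 0
      · have hbasis : ((PySem.List.enumerate matrix).foldl
            (fun acc p => if p.1 ≠ row then (if PySem.List.pyGetD p.2 a1 0 ≠ 0 then false else acc) else acc) true) = true := by
          rw [pvFoldA]
          refine ⟨rfl, ?_⟩
          rw [hk]
          exact (hiff a1.toNat hkW).1 (by rw [← hk]; exact hz)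
        simp only [pvLoopA, pvFindB]
        rw [if_pos hbasis, if_pos ⟨hc.1, hc.2, hz⟩]
      · have hbasis : ((PySem.List.enumerate matrix).foldl
            (fun acc p => if p.1 ≠ row then (if PySem.List.pyGetD p.2 a1 0 ≠ 0 then false else acc) else acc) true) ≠ true := by
          intro hfold
          obtain ⟨-, hall⟩ := (pvFoldA row a1 (PySem.List.enumerate matrix) true).1 hfold
          exact hz (by rw [hk]; exact (hiff a1.toNat hkW).2 (by rw [← hk]; exact hall))
        simp only [pvLoopA, pvFindB]
        rw [if_neg hbasis, if_neg (by rintro ⟨-, -, h⟩; exact hz h)]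
        exact ih hl
    · rw [List.filterMap_cons_none (f := fun p : Int × Int => if p.2 = 1 ∧ p.1 ∉ excluded then some p.1 else none) (by simp only [ite_eq_right_iff]; intro h; exact absurd h hc)]
      simp only [pvFindB]
      rw [if_neg (by rintro ⟨h1, h2, -⟩; exact hc ⟨h1, h2⟩)]
      exact ih hl

-- ===== VERDICT (by name: the statement is the Claim_ definition above) =====
theorem getBasisIndexFromRow_spec : Claim_equal_getBasisIndexFromRow := by
  intro matrix excluded row _ _
  unfold Spec_getBasisIndexFromRow getBasisIndexFromRow getBasisIndexFromRow_alt
  set rowL := PySem.List.pyGetD matrix row [] with hrowL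
  obtain ⟨_, _, H⟩ := pvCounts row rowL.length (PySem.List.enumerate matrix) (List.replicate rowL.length 0)
    (by simp) (by intro k hk; simp)
  refine pvMain matrix excluded row _ rowL.length (fun k hk => ?_) _ (fun p hp => ?_)
  · rw [PySem.List.pyGetD_natCast]
    rw [H k hk]
    simp
  · have := pvMemEnum hp
    omega
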